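-- pv_equiv track=rewrite | github.com/anthill1650-eng/Medscan | backend/api.py | _counts_summary
-- ===== SOURCE A (Python) =====
-- from typing import Any, Dict, List, Optional
-- from typing import Any, Dict, List, Optional
--
-- def _counts_summary(results: List[Dict[str, Any]]) -> str:
--     if not results:
--         return "No lab results were detected in the text."
--
--     counts = {"high": 0, "low": 0, "in_range": 0, "unknown": 0}
--     for r in results:
--         s = r.get("status")
--         if s in counts:
--             counts[s] += 1
--         else:
--             counts["unknown"] += 1
--
--     return (
--         f"Summary: {counts['high']} high, "
--         f"{counts['low']} low, "
--         f"{counts['in_range']} in range, "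
--         f"{counts['unknown']} unknown."
--     )
-- ===== SOURCE B (Python) =====
-- from typing import Any, Dict, List, Optional
--
-- def _counts_summary(results: List[Dict[str, Any]]) -> str:
--     if not results:
--         return "No lab results were detected in the text."
--
--     def tally(items):
--         # divide and conquer: split in half, tally each half, add the tuples
--         if not items:
--             return (0, 0, 0, 0)
--         if len(items) == 1:
--             s = items[0]
--             if s == "high":
--                 return (1, 0, 0, 0)
--             if s == "low":
--                 return (0, 1, 0, 0)
--             if s == "in_range":
--                 return (0, 0, 1, 0)
--             return (0, 0, 0, 1)
--         mid = len(items) // 2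
--         a = tally(items[:mid])
--         b = tally(items[mid:])
--         return (a[0] + b[0], a[1] + b[1], a[2] + b[2], a[3] + b[3])
--
--     h, l, i, u = tally([r.get("status") for r in results])
--     return (
--         f"Summary: {h} high, "
--         f"{l} low, "
--         f"{i} in range, "
--         f"{u} unknown."
--     )
-- ===== Notes on version B (the rewrite author's own statement) =====
-- stated objective: alternative
-- what changed: Replaces A's sequential dict-bucketing loop with a divide-and-conquer tally: the status list is split in half recursively, leaves map one status to a unit tuple, and the four-counter tuples of the halves are added on the way back up.
import Mathlib
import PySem

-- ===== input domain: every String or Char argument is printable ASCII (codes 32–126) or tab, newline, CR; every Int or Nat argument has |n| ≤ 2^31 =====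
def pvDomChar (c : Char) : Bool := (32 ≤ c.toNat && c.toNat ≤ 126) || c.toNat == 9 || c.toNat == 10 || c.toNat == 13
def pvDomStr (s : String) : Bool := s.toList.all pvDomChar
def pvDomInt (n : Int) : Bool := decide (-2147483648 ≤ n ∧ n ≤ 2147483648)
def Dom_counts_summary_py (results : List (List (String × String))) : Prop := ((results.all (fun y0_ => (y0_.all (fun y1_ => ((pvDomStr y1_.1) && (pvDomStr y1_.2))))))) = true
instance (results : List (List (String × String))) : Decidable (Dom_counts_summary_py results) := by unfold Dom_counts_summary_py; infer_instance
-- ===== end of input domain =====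

-- B replaces A's sequential dict-bucketing loop with a divide-and-conquer tally
-- (halve the status list, tally each half, add the four-counter tuples); objective: alternative.

-- ===== PORT A =====
-- the body of A's for-loop: update counts from one record's status
def countsStep (counts : PySem.Dict String Int) (s : Option String) : PySem.Dict String Int :=
  match s with
  | some v => if counts.contains v then counts.modify v 0 (· + 1) else counts.modify "unknown" 0 (· + 1)
  | none => counts.modify "unknown" 0 (· + 1)

def counts_summary_py (results : List (List (String × String))) : String :=
  if results.isEmpty then "No lab results were detected in the text."
  else
    let counts0 : PySem.Dict String Int :=
      PySem.Dict.ofList [("high", 0), ("low", 0), ("in_range", 0), ("unknown", 0)]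
    let counts := results.foldl (fun counts r => countsStep counts ((PySem.Dict.mk r).get? "status")) counts0
    "Summary: " ++ PySem.Int.toStr (counts.getD "high" 0) ++ " high, "
      ++ PySem.Int.toStr (counts.getD "low" 0) ++ " low, "
      ++ PySem.Int.toStr (counts.getD "in_range" 0) ++ " in range, "
      ++ PySem.Int.toStr (counts.getD "unknown" 0) ++ " unknown."

-- ===== PORT B =====
-- leaf of Source B's tally: one status to a unit tuple (the if-chain of the len==1 case)
def leafTally (s : Option String) : Int × Int × Int × Int :=
  if s = some "high" then (1, 0, 0, 0)
  else if s = some "low" then (0, 1, 0, 0)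
  else if s = some "in_range" then (0, 0, 1, 0)
  else (0, 0, 0, 1)

-- Source B's tally: split in half (items[:mid]/items[mid:] = take/drop for mid ≥ 0, exact), add the tuples
def tallyDC : List (Option String) → Int × Int × Int × Int
  | [] => (0, 0, 0, 0)
  | [s] => leafTally s
  | x :: y :: rest =>
      let l := x :: y :: rest
      let mid := l.length / 2
      let a := tallyDC (l.take mid)
      let b := tallyDC (l.drop mid)
      (a.1 + b.1, a.2.1 + b.2.1, a.2.2.1 + b.2.2.1, a.2.2.2 + b.2.2.2)
termination_by l => l.length
decreasing_by
  · simp [List.length_take]; omega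
  · simp [List.length_drop]; omega

def counts_summary_py_alt (results : List (List (String × String))) : String :=
  if results.isEmpty then "No lab results were detected in the text."
  else
    let t := tallyDC (results.map (fun r => (PySem.Dict.mk r).get? "status"))
    "Summary: " ++ PySem.Int.toStr t.1 ++ " high, "
      ++ PySem.Int.toStr t.2.1 ++ " low, "
      ++ PySem.Int.toStr t.2.2.1 ++ " in range, "
      ++ PySem.Int.toStr t.2.2.2 ++ " unknown."

-- ===== PRECONDITION & SPEC =====
def Spec_counts_summary_py (results : List (List (String × String))) (out : String) : Prop := out = counts_summary_py_alt results
instance (results : List (List (String × String))) (out : String) : Decidable (Spec_counts_summary_py results out) := by unfold Spec_counts_summary_py; infer_instance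

-- ===== CLAIM (what is proved, stated in full; the proofs are below) =====
def Claim_equal_counts_summary_py : Prop := ∀ (results : List (List (String × String))), Dom_counts_summary_py results → Spec_counts_summary_py results (counts_summary_py results)

-- ===== LEMMAS AND PROOFS =====

-- loop-step lemma: effect of one iteration of A's loop on each of the four counters
theorem countsStep_getD (d : PySem.Dict String Int) (s : Option String) (k : String)
    (h : d.keys = ["high", "low", "in_range", "unknown"]) (hk : k ∈ ["high", "low", "in_range", "unknown"]) :
    (countsStep d s).getD k 0 = d.getD k 0 +
      (if (s = some k ∧ k ≠ "unknown") ∨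
          (k = "unknown" ∧ s ≠ some "high" ∧ s ≠ some "low" ∧ s ≠ some "in_range") then 1 else 0) := by
  unfold countsStep
  cases s with
  | none =>
    dsimp only
    rw [PySem.Dict.getD_modify]
    fin_cases hk <;> simp
  | some v =>
    dsimp only
    by_cases hv : v ∈ ["high", "low", "in_range", "unknown"]
    · have hc : d.contains v = true := by
        rw [PySem.Dict.contains_eq_decide_mem_keys, h]; simpa using hv
      rw [if_pos hc, PySem.Dict.getD_modify]
      fin_cases hk <;> fin_cases hv <;> simp
    · have hc : ¬ d.contains v = true := by
        rw [PySem.Dict.contains_eq_decide_mem_keys, h]; simpa using hv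
      rw [if_neg hc, PySem.Dict.getD_modify]
      simp only [List.mem_cons, not_or] at hv
      obtain ⟨h1, h2, h3, h4⟩ := hv
      fin_cases hk <;> simp_all

-- loop invariant: the fold's four counters, in terms of list counts of the status list
theorem countsFold_inv (l : List (Option String)) (d : PySem.Dict String Int)
    (h : d.keys = ["high", "low", "in_range", "unknown"]) :
    (l.foldl countsStep d).getD "high" 0 = d.getD "high" 0 + l.count (some "high") ∧
    (l.foldl countsStep d).getD "low" 0 = d.getD "low" 0 + l.count (some "low") ∧
    (l.foldl countsStep d).getD "in_range" 0 = d.getD "in_range" 0 + l.count (some "in_range") ∧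
    (l.foldl countsStep d).getD "unknown" 0 = d.getD "unknown" 0 +
      ((l.length : Int) - l.count (some "high") - l.count (some "low") - l.count (some "in_range")) := by
  induction l generalizing d with
  | nil => simp
  | cons s l ih =>
    have hk : (countsStep d s).keys = ["high", "low", "in_range", "unknown"] := by
      unfold countsStep
      have hu : d.contains "unknown" = true := by
        rw [PySem.Dict.contains_eq_decide_mem_keys, h]; decide
      cases s with
      | none =>
        dsimp only
        rw [PySem.Dict.keys_modify, PySem.Dict.keys_insert_of_contains _ _ hu, h]
      | some v =>
        dsimp only
        by_cases hc : d.contains v = true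
        · rw [if_pos hc, PySem.Dict.keys_modify, PySem.Dict.keys_insert_of_contains _ _ hc, h]
        · rw [if_neg hc, PySem.Dict.keys_modify, PySem.Dict.keys_insert_of_contains _ _ hu, h]
    obtain ⟨ih1, ih2, ih3, ih4⟩ := ih (countsStep d s) hk
    simp only [List.foldl_cons, List.count_cons]
    rw [ih1, ih2, ih3, ih4]
    rw [countsStep_getD d s "high" h (by decide), countsStep_getD d s "low" h (by decide),
        countsStep_getD d s "in_range" h (by decide), countsStep_getD d s "unknown" h (by decide)]
    refine ⟨?_, ?_, ?_, ?_⟩ <;>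
      · split_ifs <;> simp_all <;> omega

-- characterisation of B's divide-and-conquer tally in terms of list counts
theorem tallyDC_spec (l : List (Option String)) :
    tallyDC l = ((l.count (some "high") : Int), (l.count (some "low") : Int),
      (l.count (some "in_range") : Int),
      (l.length : Int) - l.count (some "high") - l.count (some "low") - l.count (some "in_range")) := by
  induction l using tallyDC.induct with
  | case1 => simp [tallyDC]
  | case2 s =>
    simp only [tallyDC, leafTally, List.count_cons, List.count_nil, List.length_singleton]
    split_ifs <;> simp_all
  | case3 x y rest L mid ih1 ih2 =>
    simp only [tallyDC]
    have e1 : L = x :: y :: rest := rfl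
    have e2 : mid = (x :: y :: rest).length / 2 := rfl
    rw [e1, e2] at ih1 ih2
    rw [ih1, ih2]
    have hsplit := (List.take_append_drop ((x :: y :: rest).length / 2) (x :: y :: rest)).symm
    have hc : ∀ s : Option String, List.count s (x :: y :: rest)
        = List.count s (List.take ((x :: y :: rest).length / 2) (x :: y :: rest))
          + List.count s (List.drop ((x :: y :: rest).length / 2) (x :: y :: rest)) := by
      intro s
      conv_lhs => rw [hsplit]
      rw [List.count_append]
    have hl : (x :: y :: rest).length
        = (List.take ((x :: y :: rest).length / 2) (x :: y :: rest)).length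
          + (List.drop ((x :: y :: rest).length / 2) (x :: y :: rest)).length := by
      conv_lhs => rw [hsplit]
      rw [List.length_append]
    refine Prod.ext ?_ (Prod.ext ?_ (Prod.ext ?_ ?_)) <;>
      · dsimp only
        have c1 := hc (some "high")
        have c2 := hc (some "low")
        have c3 := hc (some "in_range")
        omega

-- ===== VERDICT (by name: the statement is the Claim_ definition above) =====
theorem counts_summary_py_spec : Claim_equal_counts_summary_py := by
  intro results _
  unfold Spec_counts_summary_py counts_summary_py counts_summary_py_alt
  by_cases he : results.isEmpty
  · simp [he]
  · simp only [he]  -- nonempty branch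
    have hmap :
        (results.map (fun r => (PySem.Dict.mk r).get? "status")).foldl countsStep
            (PySem.Dict.ofList [("high", 0), ("low", 0), ("in_range", 0), ("unknown", 0)])
          = results.foldl (fun counts r => countsStep counts ((PySem.Dict.mk r).get? "status"))
            (PySem.Dict.ofList [("high", 0), ("low", 0), ("in_range", 0), ("unknown", 0)]) := by
      rw [List.foldl_map]
    rw [← hmap]
    obtain ⟨h1, h2, h3, h4⟩ := countsFold_inv
      (results.map (fun r => (PySem.Dict.mk r).get? "status"))
      (PySem.Dict.ofList [("high", 0), ("low", 0), ("in_range", 0), ("unknown", 0)]) (by decide)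
    rw [h1, h2, h3, h4, tallyDC_spec]
    have z : ∀ k : String, k ∈ ["high", "low", "in_range", "unknown"] →
        (PySem.Dict.ofList [("high", (0 : Int)), ("low", 0), ("in_range", 0), ("unknown", 0)]).getD k 0 = 0 := by
      decide
    rw [z "high" (by decide), z "low" (by decide), z "in_range" (by decide), z "unknown" (by decide)]
    simp
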